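-- pv_equiv track=rewrite | github.com/minseokpark6/Problem_Solving | 프로그래머스/0/181894. 2의 영역/2의 영역.py | solution
-- ===== SOURCE A (Python) =====
-- def solution(arr):
--     answer = []
--
--     # 인덱스 담기
--     idx_list = []
--     for idx, n in enumerate(arr):
--         if n == 2:
--             idx_list.append(idx)
--
--     # 배열 안의 2가 모두 포함된 가장 작은 연속된 배열 구하기
--     if len(idx_list) > 1:
--         s, e = idx_list[0], idx_list[-1]
--         answer = arr[s:e+1]
--     elif len(idx_list) == 1:
--         answer.append(arr[idx_list[0]])
--     else:
--         answer.append(-1)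
--
--     # 출력
--     return answer
-- ===== SOURCE B (Python) =====
-- def solution(arr):
--     acc = None       # slice built so far (None until the first 2 is seen)
--     pending = []     # elements since the last 2, not yet known to be inside the slice
--     for x in arr:
--         if x == 2:
--             if acc is None:
--                 acc = [2]
--             else:
--                 acc = acc + pending + [2]
--             pending = []
--         elif acc is not None:
--             pending.append(x)
--     return acc if acc is not None else [-1]
-- ===== Notes on version B (the rewrite author's own statement) =====
-- stated objective: alternative
-- what changed: B replaces A's two-stage plan (collect every index of 2 into a list, then branch on its length and slice/index into arr) by a single left-to-right fold that builds the answer segment directly, buffering elements after the last seen 2 in a pending list and flushing it at each new 2; no index arithmetic, no slicing, no index list.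
import Mathlib
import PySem

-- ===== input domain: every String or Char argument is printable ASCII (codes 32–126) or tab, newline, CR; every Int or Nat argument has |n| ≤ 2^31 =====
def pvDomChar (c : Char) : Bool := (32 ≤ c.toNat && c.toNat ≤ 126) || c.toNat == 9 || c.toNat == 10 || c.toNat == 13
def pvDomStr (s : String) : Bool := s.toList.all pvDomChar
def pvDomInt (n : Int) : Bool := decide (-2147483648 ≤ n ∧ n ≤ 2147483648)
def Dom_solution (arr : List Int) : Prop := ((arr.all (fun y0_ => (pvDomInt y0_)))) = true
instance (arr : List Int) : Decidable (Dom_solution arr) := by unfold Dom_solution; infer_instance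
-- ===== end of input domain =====

-- B replaces A's index-list pass plus index/slice arithmetic by a single left-to-right fold
-- that builds the answer segment directly with a pending buffer (objective: alternative).

-- ===== PORT A =====
def solution (arr : List Int) : List Int :=
  let answer : List Int := []
  -- idx_list collects the index of every 2
  let idxList : List Int :=
    (PySem.List.enumerate arr 0).foldl
      (fun acc p => if p.2 == 2 then acc ++ [p.1] else acc) []
  if idxList.length > 1 then
    let s := PySem.List.pyGetD idxList 0 0
    let e := PySem.List.pyGetD idxList (-1) 0
    PySem.List.slice arr (some s) (some (e + 1))
  else if idxList.length == 1 then
    answer ++ [PySem.List.pyGetD arr (PySem.List.pyGetD idxList 0 0) 0]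
  else
    answer ++ [-1]

-- ===== PORT B =====
-- loop body of Source B: state = (acc : Option (slice so far), pending : elements since the last 2)
def pvStep (s : Option (List Int) × List Int) (x : Int) : Option (List Int) × List Int :=
  if x == 2 then
    match s.1 with
    | none => (some [2], [])
    | some a => (some (a ++ s.2 ++ [2]), [])
  else
    match s.1 with
    | some _ => (s.1, s.2 ++ [x])
    | none => s

def solution_alt (arr : List Int) : List Int :=
  let st := arr.foldl pvStep (none, [])
  match st.1 with
  | some a => a
  | none => [-1]

-- ===== PRECONDITION & SPEC =====
def Spec_solution (arr : List Int) (out : List Int) : Prop := out = solution_alt arr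
instance (arr : List Int) (out : List Int) : Decidable (Spec_solution arr out) := by unfold Spec_solution; infer_instance

-- ===== CLAIM (what is proved, stated in full; the proofs are below) =====
def Claim_equal_solution : Prop := ∀ (arr : List Int), Dom_solution arr → Spec_solution arr (solution arr)

-- ===== LEMMAS AND PROOFS =====

-- prefix of t up to (and including) the LAST 2, or junk if no 2
def pvUpto2 : List Int → List Int
  | [] => []
  | x :: t => if (2 : Int) ∈ t then x :: pvUpto2 t else if x = 2 then [2] else []

-- suffix of t after the last 2 (meaningful only when 2 ∈ t)
def pvRest2 : List Int → List Int
  | [] => []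
  | _x :: t => if (2 : Int) ∈ t then pvRest2 t else t

-- segment from the first 2 to the last 2 (meaningful only when 2 ∈ t)
def pvMid2 : List Int → List Int
  | [] => []
  | x :: t => if x = 2 then (if (2 : Int) ∈ t then 2 :: pvUpto2 t else [2]) else pvMid2 t

def pvMrest : List Int → List Int
  | [] => []
  | x :: t => if x = 2 then (if (2 : Int) ∈ t then pvRest2 t else t) else pvMrest t

theorem pvFold_some (t : List Int) (acc p : List Int) :
    t.foldl pvStep (some acc, p)
      = if (2 : Int) ∈ t then (some (acc ++ p ++ pvUpto2 t), pvRest2 t)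
        else (some acc, p ++ t) := by
  induction t generalizing acc p with
  | nil => simp
  | cons x t ih =>
    by_cases hx : x = 2
    · subst hx
      rw [List.foldl_cons, show pvStep (some acc, p) 2 = (some (acc ++ p ++ [2]), []) from rfl,
        ih]
      by_cases h2 : (2 : Int) ∈ t <;> simp [pvUpto2, pvRest2, h2]
    · rw [List.foldl_cons,
        show pvStep (some acc, p) x = (some acc, p ++ [x]) by
          simp [pvStep, hx], ih]
      by_cases h2 : (2 : Int) ∈ t <;>
        simp [pvUpto2, pvRest2, h2, Ne.symm hx]

theorem pvFold_none (t : List Int) :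
    t.foldl pvStep (none, [])
      = if (2 : Int) ∈ t then (some (pvMid2 t), pvMrest t) else (none, []) := by
  induction t with
  | nil => simp
  | cons x t ih =>
    by_cases hx : x = 2
    · subst hx
      rw [List.foldl_cons, show pvStep (none, []) 2 = (some [2], []) from rfl,
        pvFold_some]
      by_cases h2 : (2 : Int) ∈ t <;> simp [pvMid2, pvMrest, h2]
    · rw [List.foldl_cons,
        show pvStep (none, []) x = (none, []) by simp [pvStep, hx], ih]
      by_cases h2 : (2 : Int) ∈ t <;>
        simp [pvMid2, pvMrest, h2, hx, Ne.symm hx]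

theorem pvAlt_char (arr : List Int) :
    solution_alt arr = if (2 : Int) ∈ arr then pvMid2 arr else [-1] := by
  unfold solution_alt
  rw [pvFold_none]
  by_cases h2 : (2 : Int) ∈ arr <;> simp [h2]

theorem pvUpto2_take (t : List Int) (h : (2 : Int) ∈ t) :
    pvUpto2 t = t.take (t.length - t.reverse.idxOf 2) := by
  induction t with
  | nil => cases h
  | cons x t ih =>
    by_cases h2 : (2 : Int) ∈ t
    · have hr : (2 : Int) ∈ t.reverse := by simpa using h2
      have hlt : t.reverse.idxOf 2 < t.length := by
        simpa using List.idxOf_lt_length_of_mem hr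
      rw [pvUpto2, if_pos h2, ih h2]
      simp [List.idxOf_append_of_mem hr]
      rw [show t.length + 1 - t.reverse.idxOf 2
            = (t.length - t.reverse.idxOf 2) + 1 by omega]
      simp
    · have hx : x = 2 := by
        cases h with
        | head => rfl
        | tail _ h' => exact absurd h' h2
      subst hx
      have hr : (2 : Int) ∉ t.reverse := by simpa using h2
      rw [pvUpto2, if_neg h2, if_pos rfl]
      simp [List.idxOf_append_of_notMem hr]

theorem pvMid2_take_drop (t : List Int) (h : (2 : Int) ∈ t) :
    pvMid2 t = (t.drop (t.idxOf 2)).take (t.length - t.reverse.idxOf 2 - t.idxOf 2) := by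
  induction t with
  | nil => cases h
  | cons x t ih =>
    by_cases hx : x = 2
    · subst hx
      by_cases h2 : (2 : Int) ∈ t
      · have hr : (2 : Int) ∈ t.reverse := by simpa using h2
        have hlt : t.reverse.idxOf 2 < t.length := by
          simpa using List.idxOf_lt_length_of_mem hr
        rw [pvMid2, if_pos rfl, if_pos h2, pvUpto2_take t h2]
        simp [List.idxOf_append_of_mem hr]
        rw [show t.length + 1 - t.reverse.idxOf 2
              = (t.length - t.reverse.idxOf 2) + 1 by omega]
        simp
      · have hr : (2 : Int) ∉ t.reverse := by simpa using h2
        rw [pvMid2, if_pos rfl, if_neg h2]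
        simp [List.idxOf_append_of_notMem hr]
    · have h2 : (2 : Int) ∈ t := by
        cases h with
        | head => exact absurd rfl hx
        | tail _ h' => exact h'
      have hr : (2 : Int) ∈ t.reverse := by simpa using h2
      have hlt : t.reverse.idxOf 2 < t.length := by
        simpa using List.idxOf_lt_length_of_mem hr
      rw [pvMid2, if_neg hx, ih h2]
      simp [List.idxOf_cons, show (x == 2) = false by simpa using hx,
        List.idxOf_append_of_mem hr]
      congr 1
      omega

-- ===== A's side: the idx_list accumulation =====
def pvIdxs (arr : List Int) (s : Int) : List Int :=
  ((PySem.List.enumerate arr s).filter (fun p => p.2 == 2)).map (·.1)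

theorem pvIdxs_foldl (arr : List Int) (s : Int) :
    (PySem.List.enumerate arr s).foldl
      (fun acc p => if p.2 == 2 then acc ++ [p.1] else acc) [] = pvIdxs arr s := by
  simpa [pvIdxs] using
    PySem.List.foldl_append_if (l := PySem.List.enumerate arr s)
      (p := fun p => p.2 == 2) (f := (·.1)) (acc := [])

theorem pvIdxs_cons (a : Int) (t : List Int) (s : Int) :
    pvIdxs (a :: t) s = (if a = 2 then [s] else []) ++ pvIdxs t (s + 1) := by
  by_cases ha : a = 2 <;> simp [pvIdxs, PySem.List.enumerate_cons, ha]

theorem pvIdxs_append_singleton (t : List Int) (a : Int) (s : Int) :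
    pvIdxs (t ++ [a]) s
      = pvIdxs t s ++ (if a = 2 then [s + (t.length : Int)] else []) := by
  by_cases ha : a = 2 <;>
    simp [pvIdxs, PySem.List.enumerate_append, PySem.List.enumerate_cons,
      List.filter_append, ha]

theorem pvIdxs_nil_iff (arr : List Int) (s : Int) :
    pvIdxs arr s = [] ↔ (2 : Int) ∉ arr := by
  induction arr generalizing s with
  | nil => simp [pvIdxs]
  | cons a t ih =>
    by_cases ha : a = 2 <;> simp [pvIdxs_cons, ha, ih (s + 1)] <;> tauto

theorem pvIdxs_head (arr : List Int) (s : Int) (h : (2 : Int) ∈ arr) :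
    (pvIdxs arr s).head? = some (s + (arr.idxOf 2 : Nat)) := by
  induction arr generalizing s with
  | nil => cases h
  | cons a t ih =>
    by_cases ha : a = 2
    · simp [pvIdxs_cons, ha]
    · have ht : (2 : Int) ∈ t := by cases h with
        | head => exact absurd rfl ha
        | tail _ h' => exact h'
      rw [pvIdxs_cons, if_neg ha, List.nil_append, ih (s + 1) ht]
      simp [List.idxOf_cons, show (a == 2) = false by simpa using ha]
      push_cast
      ring

theorem pvIdxs_last (arr : List Int) (s : Int) (h : (2 : Int) ∈ arr) :
    (pvIdxs arr s).getLast? =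
      some (s + (arr.length : Int) - 1 - (arr.reverse.idxOf 2 : Nat)) := by
  induction arr using List.reverseRecOn generalizing s with
  | nil => cases h
  | append_singleton t a ih =>
    by_cases ha : a = 2
    · rw [pvIdxs_append_singleton, if_pos ha]
      simp [ha]
      push_cast; ring
    · have ht : (2 : Int) ∈ t := by
        rcases List.mem_append.mp h with h' | h'
        · exact h'
        · simp at h'; exact absurd h'.symm ha
      have hne : pvIdxs t s ≠ [] := by
        rw [Ne, pvIdxs_nil_iff]; simpa using ht
      rw [pvIdxs_append_singleton, if_neg ha, List.append_nil, ih s ht]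
      simp [List.idxOf_cons, show (a == 2) = false by simpa using ha]
      push_cast
      ring

theorem pvA_char (arr : List Int) :
    solution arr
      = if (2 : Int) ∈ arr then
          (arr.drop (arr.idxOf 2)).take (arr.length - arr.reverse.idxOf 2 - arr.idxOf 2)
        else [-1] := by
  unfold solution
  simp only [pvIdxs_foldl]
  by_cases hm : (2 : Int) ∈ arr
  · have hhead := pvIdxs_head arr 0 hm
    have hlast := pvIdxs_last arr 0 hm
    have hrev : (2 : Int) ∈ arr.reverse := by simpa using hm
    have hj : arr.idxOf 2 < arr.length := List.idxOf_lt_length_of_mem hm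
    have hrlt : arr.reverse.idxOf 2 < arr.length := by
      simpa using List.idxOf_lt_length_of_mem hrev
    set j : Nat := arr.idxOf 2 with hjdef
    set r : Nat := arr.reverse.idxOf 2 with hrdef
    rw [if_pos hm]
    obtain ⟨v, rest, hv⟩ : ∃ v rest, pvIdxs arr 0 = v :: rest := by
      cases hE : pvIdxs arr 0 with
        | nil => exact absurd ((pvIdxs_nil_iff arr 0).mp hE) (by simpa using hm)
        | cons v rest => exact ⟨v, rest, rfl⟩
    have hv0 : v = (j : Int) := by
      rw [hv] at hhead; simp at hhead; omega
    cases rest with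
    | nil =>
      -- single occurrence: A appends arr[j]; the normal form is a one-element take
      have hvlast : v = (arr.length : Int) - 1 - (r : Int) := by
        rw [hv] at hlast; simp at hlast; omega
      have hone : arr.length - r - j = 1 := by omega
      rw [hv]
      simp only [List.length_cons, List.length_nil]
      rw [if_neg (by omega), if_pos (by simp)]
      rw [PySem.List.pyGetD_zero_cons, hv0, hone]
      rw [List.drop_eq_getElem_cons hj, List.take_succ_cons, List.take_zero]
      simp [List.getD_eq_getElem?_getD, hj]
    | cons w ws =>
      rw [hv, if_pos (by simp)]
      rw [PySem.List.pyGetD_zero_cons]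
      have hne : (v :: w :: ws) ≠ ([] : List Int) := by simp
      rw [PySem.List.pyGetD_neg_one (v :: w :: ws) 0 hne]
      have hlastv : (v :: w :: ws).getLast hne
          = (arr.length : Int) - 1 - (r : Int) := by
        have h2 := hlast
        rw [hv, List.getLast?_eq_some_getLast hne] at h2
        have h3 := Option.some.inj h2
        omega
      rw [hlastv, hv0]
      rw [show ((arr.length : Int) - 1 - (r : Int) + 1)
            = (((arr.length - r : Nat)) : Int) by omega]
      rw [PySem.List.slice_natCast]
  · have h0 : pvIdxs arr 0 = [] := (pvIdxs_nil_iff arr 0).mpr hm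
    rw [if_neg hm, h0]
    simp

-- ===== VERDICT (by name: the statement is the Claim_ definition above) =====
theorem solution_spec : Claim_equal_solution := by
  intro arr _
  unfold Spec_solution
  rw [pvA_char, pvAlt_char]
  by_cases hm : (2 : Int) ∈ arr
  · rw [if_pos hm, if_pos hm, pvMid2_take_drop arr hm]
  · rw [if_neg hm, if_neg hm]
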